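-- pv_equiv track=rewrite | github.com/CatGodOfTheWar/Common_Phrases | main.py | make_phrases_list
-- ===== SOURCE A (Python) =====
-- def make_phrases_list(file):
--     list_phrases = []
--     phrase = ""
--     for letter in file:
--         phrase = phrase + letter
--         if letter == "." or letter == "?" or letter == "!":
--             list_phrases.append(phrase)
--             phrase = ""
--     return list_phrases
-- ===== SOURCE B (Python) =====
-- def make_phrases_list(file):
--     out = []
--     rest = file
--     while True:
--         i = next((k for k, c in enumerate(rest) if c in ".?!"), -1)
--         if i == -1:
--             return out
--         out.append(rest[:i + 1])
--         rest = rest[i + 1:]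
-- ===== Notes on version B (the rewrite author's own statement) =====
-- stated objective: alternative
-- what changed: B repeatedly finds the first sentence terminator and slices the phrase off in one piece, instead of A's character-by-character string accumulator.
import Mathlib
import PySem

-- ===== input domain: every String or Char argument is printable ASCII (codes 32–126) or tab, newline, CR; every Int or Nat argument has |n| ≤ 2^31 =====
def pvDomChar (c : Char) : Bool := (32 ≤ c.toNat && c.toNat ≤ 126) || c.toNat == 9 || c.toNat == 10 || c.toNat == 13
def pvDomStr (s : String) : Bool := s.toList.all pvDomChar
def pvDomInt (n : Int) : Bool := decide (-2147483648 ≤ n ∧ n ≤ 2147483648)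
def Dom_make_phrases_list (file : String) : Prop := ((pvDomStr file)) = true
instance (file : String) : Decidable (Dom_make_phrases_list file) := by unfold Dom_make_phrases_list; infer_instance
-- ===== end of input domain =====

-- B finds the first sentence terminator and slices the whole phrase off at once,
-- instead of A's character-by-character accumulator (objective: alternative).

-- ===== PORT A =====
-- A: fold over the characters carrying (list_phrases, phrase); strings are built as List Char.
def make_phrases_list (file : String) : List String :=
  (file.toList.foldl
    (fun (st : List String × List Char) letter =>
      let phrase := st.2 ++ [letter]
      if letter = '.' ∨ letter = '?' ∨ letter = '!' then
        (st.1 ++ [String.mk phrase], [])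
      else
        (st.1, phrase))
    ([], [])).1

-- ===== PORT B =====
def pvIsTerm (c : Char) : Bool := c = '.' || c = '?' || c = '!'

-- Source B's loop: `next(first index with terminator)` = position where dropWhile stops;
-- rest[:i+1] = takeWhile ++ [terminator], rest[i+1:] = the tail after it.
def pvAltGo (cs : List Char) : List String :=
  match h : cs.dropWhile (fun c => !pvIsTerm c) with
  | [] => []
  | t :: rs => String.mk (cs.takeWhile (fun c => !pvIsTerm c) ++ [t]) :: pvAltGo rs
termination_by cs.length
decreasing_by
  have := (List.dropWhile_sublist (p := fun c => !pvIsTerm c) (l := cs)).length_le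
  rw [h] at this; simp at this ⊢; omega

def make_phrases_list_alt (file : String) : List String := pvAltGo file.toList

-- ===== PRECONDITION & SPEC =====
def Spec_make_phrases_list (file : String) (out : List String) : Prop := out = make_phrases_list_alt file
instance (file : String) (out : List String) : Decidable (Spec_make_phrases_list file out) := by unfold Spec_make_phrases_list; infer_instance

-- ===== CLAIM (what is proved, stated in full; the proofs are below) =====
def Claim_equal_make_phrases_list : Prop := ∀ (file : String), Dom_make_phrases_list file → Spec_make_phrases_list file (make_phrases_list file)

-- ===== LEMMAS AND PROOFS =====

-- B's recursion with a pending (already-scanned) prefix ph glued onto the first phrase.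
def pvPend (ph cs : List Char) : List String :=
  match cs.dropWhile (fun c => !pvIsTerm c) with
  | [] => []
  | t :: rs => String.mk (ph ++ cs.takeWhile (fun c => !pvIsTerm c) ++ [t]) :: pvAltGo rs

lemma pvAltGo_eq_pend (cs : List Char) : pvAltGo cs = pvPend [] cs := by
  unfold pvAltGo pvPend
  cases h : cs.dropWhile (fun c => !pvIsTerm c) <;> simp

-- loop invariant for A's fold
lemma pvFold_invariant (cs : List Char) : ∀ (acc : List String) (ph : List Char),
    (cs.foldl
      (fun (st : List String × List Char) letter =>
        let phrase := st.2 ++ [letter]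
        if letter = '.' ∨ letter = '?' ∨ letter = '!' then
          (st.1 ++ [String.mk phrase], [])
        else
          (st.1, phrase))
      (acc, ph)).1 = acc ++ pvPend ph cs := by
  induction cs with
  | nil => intro acc ph; simp [pvPend]
  | cons c cs ih =>
    intro acc ph
    by_cases hterm : c = '.' ∨ c = '?' ∨ c = '!'
    · have hT : pvIsTerm c = true := by
        rcases hterm with h | h | h <;> simp [pvIsTerm, h]
      simp only [List.foldl_cons, if_pos hterm]
      rw [ih]
      have hp : pvPend ph (c :: cs) = String.mk (ph ++ [c]) :: pvAltGo cs := by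
        simp [pvPend, List.dropWhile_cons, List.takeWhile_cons, hT]
      rw [hp, pvAltGo_eq_pend cs]
      simp
    · have hT : pvIsTerm c = false := by
        simp [pvIsTerm]
        tauto
      simp only [List.foldl_cons, if_neg hterm]
      rw [ih]
      congr 1
      simp only [pvPend, List.dropWhile_cons, List.takeWhile_cons, hT]
      cases h : cs.dropWhile (fun c => !pvIsTerm c) <;> simp

-- ===== VERDICT (by name: the statement is the Claim_ definition above) =====
theorem make_phrases_list_spec : Claim_equal_make_phrases_list := by
  intro file _
  unfold Spec_make_phrases_list make_phrases_list make_phrases_list_alt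
  rw [pvFold_invariant, pvAltGo_eq_pend]
  simp
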